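-- pv_equiv track=rewrite | github.com/Boilingstars/AntAlgorythm | Core_git_build_1.py | _is_death_circle
-- ===== SOURCE A (Python) =====
-- def _is_death_circle(route:list) -> bool: # Написать код выхода из кругов смерти
--     n = len(route)
--
--     # Проверяем последовательности длиной от 3 до n // 2
--     for length in range(3, n // 2 + 1):
--         for start in range(n - length):
--             # Извлекаем текущую последовательность
--             sequence = route[start:start + length]
--             # Проверяем, есть ли такая же последовательность дальше в массиве
--             for next_start in range(start + length, n - length + 1):
--                 if route[next_start:next_start + length] == sequence:
--                     return True
--
--     return False
-- ===== SOURCE B (Python) =====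
-- def _is_death_circle(route: list) -> bool:
--     # Hash each length-3 window to its first start index; a repeat with
--     # start separation >= 3 is exactly a non-overlapping repeated block.
--     first = {}
--     for j in range(len(route) - 2):
--         t = (route[j], route[j + 1], route[j + 2])
--         i = first.setdefault(t, j)
--         if j - i >= 3:
--             return True
--     return False
-- ===== Notes on version B (the rewrite author's own statement) =====
-- stated objective: faster
-- what changed: Replaced the triple nested loop over all block lengths and start pairs with a single pass that hashes each length-3 window to its first start index and reports a repeat once two equal windows are >= 3 apart (equivalent to A's repeated-block test).
import Mathlib
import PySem

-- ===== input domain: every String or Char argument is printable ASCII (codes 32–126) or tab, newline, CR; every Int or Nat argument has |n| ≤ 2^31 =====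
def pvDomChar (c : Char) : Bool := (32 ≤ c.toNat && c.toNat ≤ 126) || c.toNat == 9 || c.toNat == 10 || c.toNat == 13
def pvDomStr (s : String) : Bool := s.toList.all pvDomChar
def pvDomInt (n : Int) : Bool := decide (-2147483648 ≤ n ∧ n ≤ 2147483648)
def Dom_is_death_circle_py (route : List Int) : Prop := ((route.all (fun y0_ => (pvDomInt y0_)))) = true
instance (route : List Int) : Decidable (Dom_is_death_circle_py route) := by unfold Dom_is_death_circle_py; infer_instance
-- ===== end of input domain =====

-- B replaces A's triple loop over all lengths/starts by a single pass hashing each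
-- length-3 window to its first start index (a repeat with separation ≥ 3 is exactly
-- a non-overlapping repeated block); objective: faster (asymptotic).

-- ===== PORT A =====
def is_death_circle_py (route : List Int) : Bool :=
  let n : Int := route.length
  (PySem.List.pyRange 3 (PySem.Int.floordiv n 2 + 1)).any (fun length =>
    (PySem.List.pyRange 0 (n - length)).any (fun start =>
      let sequence := PySem.List.slice route (some start) (some (start + length))
      (PySem.List.pyRange (start + length) (n - length + 1)).any (fun next_start =>
        PySem.List.slice route (some next_start) (some (next_start + length)) == sequence)))

-- ===== PORT B =====
-- loop over range(n-2) with the dict `first`; `setdefault` ported by hand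
-- (exact: returns the stored value, or inserts and returns the new one)
def pvAltLoop (route : List Int) (first : PySem.Dict (Int × Int × Int) Int) :
    List Int → Bool
  | [] => false
  | j :: js =>
    let t : Int × Int × Int :=
      (PySem.List.pyGetD route j 0, PySem.List.pyGetD route (j + 1) 0,
       PySem.List.pyGetD route (j + 2) 0)
    match first.get? t with
    | some i => if 3 ≤ j - i then true else pvAltLoop route first js
    | none =>
        if 3 ≤ j - j then true else pvAltLoop route (first.insert t j) js

def is_death_circle_py_alt (route : List Int) : Bool :=
  pvAltLoop route PySem.Dict.empty
    (PySem.List.pyRange 0 ((route.length : Int) - 2))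

-- ===== PRECONDITION & SPEC =====
def Spec_is_death_circle_py (route : List Int) (out : Bool) : Prop := out = is_death_circle_py_alt route
instance (route : List Int) (out : Bool) : Decidable (Spec_is_death_circle_py route out) := by unfold Spec_is_death_circle_py; infer_instance

-- ===== CLAIM (what is proved, stated in full; the proofs are below) =====
def Claim_equal_is_death_circle_py : Prop := ∀ (route : List Int), Dom_is_death_circle_py route → Spec_is_death_circle_py route (is_death_circle_py route)

-- ===== LEMMAS AND PROOFS =====

-- the length-3 window at (Nat) index i, as B's dict key computes it
def pvTri (route : List Int) (i : Nat) : Int × Int × Int :=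
  (route.getD i 0, route.getD (i + 1) 0, route.getD (i + 2) 0)

-- the common characterisation both programs are proved equal to
def pvHasRep (route : List Int) : Prop :=
  ∃ i k : Nat, i + 3 ≤ k ∧ k + 3 ≤ route.length ∧ pvTri route i = pvTri route k

lemma pvTake3 (route : List Int) (i : Nat) (h : i + 3 ≤ route.length) :
    (route.drop i).take 3 = [route.getD i 0, route.getD (i + 1) 0, route.getD (i + 2) 0] := by
  simp only [List.getD_eq_getElem?_getD, List.getElem?_eq_getElem (by omega : i < route.length),
        List.getElem?_eq_getElem (by omega : i + 1 < route.length),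
        List.getElem?_eq_getElem (by omega : i + 2 < route.length), Option.getD_some]
  rw [List.drop_eq_getElem_cons (by omega), List.drop_eq_getElem_cons (by omega),
      List.drop_eq_getElem_cons (by omega)]
  simp only [List.take_succ_cons, List.take_zero]

lemma pvTri_iff_take (route : List Int) (i k : Nat)
    (hi : i + 3 ≤ route.length) (hk : k + 3 ≤ route.length) :
    pvTri route i = pvTri route k ↔ (route.drop i).take 3 = (route.drop k).take 3 := by
  rw [pvTake3 route i hi, pvTake3 route k hk]
  simp [pvTri, Prod.ext_iff]

lemma pvA_iff (route : List Int) : is_death_circle_py route = true ↔ pvHasRep route := by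
  simp only [is_death_circle_py, List.any_eq_true, PySem.List.mem_pyRange_one, beq_iff_eq]
  constructor
  · rintro ⟨L, ⟨hL3, hLn⟩, s, ⟨hs0, hsn⟩, ns, ⟨hns1, hns2⟩, heq⟩
    refine ⟨s.toNat, ns.toNat, by omega, by omega, ?_⟩
    rw [pvTri_iff_take route _ _ (by omega) (by omega)]
    have h1 := PySem.List.slice_toNat route (a := s) (b := s + L) (by omega) (by omega)
    have h2 := PySem.List.slice_toNat route (a := ns) (b := ns + L) (by omega) (by omega)
    rw [h1, h2] at heq
    have e1 : (s + L).toNat - s.toNat = L.toNat := by omega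
    have e2 : (ns + L).toNat - ns.toNat = L.toNat := by omega
    rw [e1] at heq; rw [e2] at heq
    have h3 := congrArg (List.take 3) heq
    simp only [List.take_take, Nat.min_eq_left (by omega : 3 ≤ L.toNat)] at h3
    exact h3.symm
  · rintro ⟨i, k, hik, hkn, htri⟩
    refine ⟨3, ⟨le_refl 3, ?_⟩, (i : Int), ⟨by omega, by omega⟩, (k : Int), ⟨by omega, by omega⟩, ?_⟩
    · have h6 : (6 : Int) ≤ (route.length : Int) := by omega
      have := (PySem.Int.le_floordiv_iff_mul_le (a := (route.length : Int)) (b := 2)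
        (q := 3) (by norm_num)).mpr (by omega)
      omega
    · rw [PySem.List.slice_toNat route (by omega) (by omega),
          PySem.List.slice_toNat route (by omega) (by omega)]
      have e1 : ((i : Int) + 3).toNat - (i : Int).toNat = 3 := by omega
      have e2 : ((k : Int) + 3).toNat - (k : Int).toNat = 3 := by omega
      rw [e1, e2]
      have := (pvTri_iff_take route i k (by omega) hkn).mp htri
      simp only [Int.toNat_natCast]
      exact this.symm

lemma pvB_invariant (route : List Int) :
    ∀ (m b : Nat) (first : PySem.Dict (Int × Int × Int) Int),
    m = route.length - 2 - b →
    (∀ t i, first.get? t = some i →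
       ∃ i0 : Nat, i = (i0 : Int) ∧ i0 < b ∧ pvTri route i0 = t ∧
         ∀ k < i0, pvTri route k ≠ t) →
    (∀ k < b, (first.get? (pvTri route k)).isSome) →
    (pvAltLoop route first (PySem.List.pyRange (b : Int) ((route.length : Int) - 2)) = true ↔
      ∃ i k : Nat, i + 3 ≤ k ∧ b ≤ k ∧ k + 3 ≤ route.length ∧ pvTri route i = pvTri route k) := by
  intro m
  induction m with
  | zero =>
    intro b first hm hdom hcov
    rw [PySem.List.pyRange_one_eq_nil (by omega)]
    simp only [pvAltLoop, Bool.false_eq_true, false_iff]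
    rintro ⟨i, k, hik, hbk, hkn, -⟩
    omega
  | succ m ih =>
    intro b first hm hdom hcov
    have hlt : (b : Int) < (route.length : Int) - 2 := by omega
    rw [PySem.List.pyRange_one_cons hlt]
    have ht : (PySem.List.pyGetD route (b : Int) 0, PySem.List.pyGetD route ((b : Int) + 1) 0,
        PySem.List.pyGetD route ((b : Int) + 2) 0) = pvTri route b := by
      have e1 : ((b : Int) + 1) = ((b + 1 : Nat) : Int) := by push_cast; ring
      have e2 : ((b : Int) + 2) = ((b + 2 : Nat) : Int) := by push_cast; ring
      rw [e1, e2, PySem.List.pyGetD_natCast, PySem.List.pyGetD_natCast,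
          PySem.List.pyGetD_natCast]
      rfl
    simp only [pvAltLoop, ht]
    cases hg : first.get? (pvTri route b) with
    | some i =>
      obtain ⟨i0, rfl, hi0b, htri0, hmin⟩ := hdom _ _ hg
      by_cases hfar : 3 ≤ (b : Int) - (i0 : Int)
      · simp only [if_pos hfar, true_iff]
        exact ⟨i0, b, by omega, le_refl b, by omega, htri0⟩
      · simp only [if_neg hfar]
        rw [show ((b : Int) + 1) = ((b + 1 : Nat) : Int) by push_cast; ring]
        rw [ih (b + 1) first (by omega) (fun t i h => by
              obtain ⟨j0, h1, h2, h3, h4⟩ := hdom t i h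
              exact ⟨j0, h1, by omega, h3, h4⟩)
            (fun k hk => by
              rcases Nat.lt_succ_iff_lt_or_eq.mp hk with h | rfl
              · exact hcov k h
              · rw [hg]; rfl)]
        constructor
        · rintro ⟨i, k, h1, h2, h3, h4⟩; exact ⟨i, k, h1, by omega, h3, h4⟩
        · rintro ⟨i, k, h1, h2, h3, h4⟩
          rcases Nat.lt_or_ge k (b + 1) with hk | hk
          · -- k = b: contradiction with hfar via first-occurrence minimality
            have hkb : k = b := by omega
            subst hkb
            have hle : i0 ≤ i := by
              by_contra hlt'
              exact hmin i (by omega) h4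
            omega
          · exact ⟨i, k, h1, hk, h3, h4⟩
    | none =>
      simp only [if_neg (show ¬ (3 ≤ (b : Int) - (b : Int)) by omega)]
      have hnotb : ∀ k < b, pvTri route k ≠ pvTri route b := by
        intro k hk heq
        have := hcov k hk
        rw [heq, hg] at this
        simp at this
      rw [show ((b : Int) + 1) = ((b + 1 : Nat) : Int) by push_cast; ring]
      rw [ih (b + 1) (first.insert (pvTri route b) (b : Int)) (by omega)
          (fun t i h => by
            by_cases he : t = pvTri route b
            · subst he
              rw [PySem.Dict.get?_insert_self] at h
              exact ⟨b, (Option.some_inj.mp h).symm, by omega, rfl,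
                fun k hk hteq => hnotb k hk hteq⟩
            · rw [PySem.Dict.get?_insert_of_ne _ _ he] at h
              obtain ⟨j0, h1, h2, h3, h4⟩ := hdom t i h
              exact ⟨j0, h1, by omega, h3, h4⟩)
          (fun k hk => by
            rcases Nat.lt_succ_iff_lt_or_eq.mp hk with h | rfl
            · rw [PySem.Dict.get?_insert_of_ne _ _ (hnotb k h)]
              exact hcov k h
            · rw [PySem.Dict.get?_insert_self]; rfl)]
      constructor
      · rintro ⟨i, k, h1, h2, h3, h4⟩; exact ⟨i, k, h1, by omega, h3, h4⟩
      · rintro ⟨i, k, h1, h2, h3, h4⟩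
        rcases Nat.lt_or_ge k (b + 1) with hk | hk
        · have hkb : k = b := by omega
          subst hkb
          exact absurd h4 (hnotb i (by omega))
        · exact ⟨i, k, h1, hk, h3, h4⟩

lemma pvB_iff (route : List Int) : is_death_circle_py_alt route = true ↔ pvHasRep route := by
  unfold is_death_circle_py_alt pvHasRep
  have h := pvB_invariant route (route.length - 2) 0 PySem.Dict.empty (by omega)
    (fun t i h => by rw [PySem.Dict.get?_empty] at h; exact absurd h (by simp))
    (fun k hk => absurd hk (Nat.not_lt_zero k))
  simpa using h

-- ===== VERDICT (by name: the statement is the Claim_ definition above) =====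
theorem is_death_circle_py_spec : Claim_equal_is_death_circle_py := by
  intro route _
  unfold Spec_is_death_circle_py
  have hA := pvA_iff route
  have hB := pvB_iff route
  cases hA' : is_death_circle_py route <;> cases hB' : is_death_circle_py_alt route <;>
    simp_all
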